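-- pv_equiv track=rewrite | github.com/up700/GuJiNER | utils/fusion_func.py | write_output
-- ===== SOURCE A (Python) =====
-- def write_output(seq_preds_list, lines):
--     outputs = []
--     for i in range(len(seq_preds_list)):
--         pred_seq = seq_preds_list[i]
--         org_words = lines[i]
--         sent = ""
--         flag = False
--         tmp = "O"
--         for tag, w in zip(pred_seq, org_words):
--             if tag == "O":
--                 if flag:
--                     sent += "|"+tmp+"}"+w
--                     flag = False
--                 else:
--                     sent += w
--             elif tag.startswith("B-"):
--                 if flag:
--                     sent += "|"+tmp+"}"
--                     flag = False
--                 sent += "{"+w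
--                 flag = True
--             elif tag.startswith("I-"):
--                 sent += w
--             tmp = tag.split("-")[-1]
--
--         if flag:
--             sent += "|"+tmp+"}"
--             flag = False
--
--         outputs.append(sent)
--
--     return outputs
-- ===== SOURCE B (Python) =====
-- def write_output(seq_preds_list, lines):
--     # Two-pass per sentence: pass 1 builds a segment list (entity spans vs plain words),
--     # pass 2 renders the segments.  NOTE: where len(lines) < len(seq_preds_list) the
--     # original raises IndexError; this zip-based version returns the truncated output.
--     outputs = []
--     for pred_seq, org_words in zip(seq_preds_list, lines):
--         segs = []
--         buf = None          # words of the currently open entity, or None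
--         last = "O"          # tag seen at the previous position
--         for tag, w in zip(pred_seq, org_words):
--             if tag == "O":
--                 if buf is not None:
--                     segs.append((buf, last.split("-")[-1]))
--                     buf = None
--                 segs.append(w)
--             elif tag.startswith("B-"):
--                 if buf is not None:
--                     segs.append((buf, last.split("-")[-1]))
--                 buf = [w]
--             elif tag.startswith("I-"):
--                 if buf is not None:
--                     buf.append(w)
--                 else:
--                     segs.append(w)
--             last = tag
--         if buf is not None:
--             segs.append((buf, last.split("-")[-1]))
--         outputs.append("".join(
--             "{" + "".join(s[0]) + "|" + s[1] + "}" if isinstance(s, tuple) else s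
--             for s in segs))
--     return outputs
-- ===== Notes on version B (the rewrite author's own statement) =====
-- stated objective: alternative
-- what changed: B replaces A's single-pass string accumulator with state flags by a two-pass decomposition: pass 1 builds a list of segments (entity word-spans with their label vs plain words) via a buffer opened on B- and flushed on O/B-/end, pass 2 renders and joins the segments; the outer index loop becomes a zip.
import Mathlib
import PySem

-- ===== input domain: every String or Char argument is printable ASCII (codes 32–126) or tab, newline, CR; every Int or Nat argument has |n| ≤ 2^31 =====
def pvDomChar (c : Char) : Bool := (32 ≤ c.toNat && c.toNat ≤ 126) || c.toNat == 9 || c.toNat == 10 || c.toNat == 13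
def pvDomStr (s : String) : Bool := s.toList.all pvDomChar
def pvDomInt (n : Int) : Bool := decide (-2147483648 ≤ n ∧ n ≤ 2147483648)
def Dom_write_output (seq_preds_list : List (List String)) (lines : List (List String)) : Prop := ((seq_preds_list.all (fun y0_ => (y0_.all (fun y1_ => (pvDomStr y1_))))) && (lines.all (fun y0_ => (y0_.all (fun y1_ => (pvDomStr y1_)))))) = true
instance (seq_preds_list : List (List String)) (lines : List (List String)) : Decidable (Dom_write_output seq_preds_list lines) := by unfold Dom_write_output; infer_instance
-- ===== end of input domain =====

-- B replaces A's one-pass string accumulator (sent/flag/tmp state machine) by a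
-- two-pass decomposition: pass 1 builds a segment list (entity spans vs plain words),
-- pass 2 renders and joins the segments; same cost, different structure (objective: alternative).

-- tag.split("-")[-1]  (split on "-" is never empty, so the getD/getLastD defaults are unreachable)
def pySuffix (t : String) : String := ((PySem.Str.split? t "-").getD []).getLastD ""

-- ===== PORT A =====
def stepA (st : String × Bool × String) (p : String × String) : String × Bool × String :=
  let sent := st.1; let flag := st.2.1; let tmp := st.2.2
  let tag := p.1; let w := p.2
  let st' : String × Bool :=
    if tag == "O" then
      (if flag then (sent ++ "|" ++ tmp ++ "}" ++ w, false) else (sent ++ w, flag))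
    else if PySem.Str.startswith tag "B-" then
      ((if flag then sent ++ "|" ++ tmp ++ "}" else sent) ++ "{" ++ w, true)
    else if PySem.Str.startswith tag "I-" then
      (sent ++ w, flag)
    else (sent, flag)
  (st'.1, st'.2, pySuffix tag)

def finishA (st : String × Bool × String) : String :=
  if st.2.1 then st.1 ++ "|" ++ st.2.2 ++ "}" else st.1

def sentA (l : List (String × String)) : String := finishA (l.foldl stepA ("", false, "O"))

def write_output (seq_preds_list : List (List String)) (lines : List (List String)) : List String :=
  -- 'lines[i]' raises IndexError when i ≥ len(lines); Pre_ excludes that, the getD default is unreachable inside Pre_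
  (PySem.List.pyRange 0 seq_preds_list.length 1).foldl
    (fun outputs i =>
      outputs ++ [sentA ((PySem.List.pyGetD seq_preds_list i []).zip (PySem.List.pyGetD lines i []))]) []

-- ===== PORT B =====
inductive Seg where
  | ent : List String → String → Seg
  | txt : String → Seg
deriving DecidableEq, Repr

def rendSeg : Seg → String
  | Seg.ent ws lab => "{" ++ PySem.Str.join "" ws ++ "|" ++ lab ++ "}"
  | Seg.txt w => w

def stepB (st : List Seg × Option (List String) × String) (p : String × String) :
    List Seg × Option (List String) × String :=
  let segs := st.1; let buf := st.2.1; let last := st.2.2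
  let tag := p.1; let w := p.2
  if tag == "O" then
    (match buf with
     | some ws => (segs ++ [Seg.ent ws (pySuffix last), Seg.txt w], none, tag)
     | none => (segs ++ [Seg.txt w], none, tag))
  else if PySem.Str.startswith tag "B-" then
    ((match buf with
      | some ws => segs ++ [Seg.ent ws (pySuffix last)]
      | none => segs), some [w], tag)
  else if PySem.Str.startswith tag "I-" then
    (match buf with
     | some ws => (segs, some (ws ++ [w]), tag)
     | none => (segs ++ [Seg.txt w], none, tag))
  else (segs, buf, tag)

def closeB (st : List Seg × Option (List String) × String) : List Seg :=
  match st.2.1 with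
  | some ws => st.1 ++ [Seg.ent ws (pySuffix st.2.2)]
  | none => st.1

def sentB (l : List (String × String)) : String :=
  PySem.Str.join "" ((closeB (l.foldl stepB ([], none, "O"))).map rendSeg)

def write_output_alt (seq_preds_list : List (List String)) (lines : List (List String)) : List String :=
  (seq_preds_list.zip lines).map (fun p => sentB (p.1.zip p.2))

-- ===== PRECONDITION & SPEC =====
-- Pre_ excludes exactly the inputs where A raises IndexError at lines[i] (lines shorter than seq_preds_list)
def Pre_write_output (seq_preds_list : List (List String)) (lines : List (List String)) : Prop :=
  seq_preds_list.length ≤ lines.length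
instance (seq_preds_list : List (List String)) (lines : List (List String)) : Decidable (Pre_write_output seq_preds_list lines) := by unfold Pre_write_output; infer_instance

def pvWitness_write_output : List (List String) × List (List String) :=
  ([["B-PER", "I-PER", "O"]], [["a", "b", "c"]])

def Spec_write_output (seq_preds_list : List (List String)) (lines : List (List String)) (out : List String) : Prop := out = write_output_alt seq_preds_list lines
instance (seq_preds_list : List (List String)) (lines : List (List String)) (out : List String) : Decidable (Spec_write_output seq_preds_list lines out) := by unfold Spec_write_output; infer_instance

-- ===== CLAIM (what is proved, stated in full; the proofs are below) =====
def Claim_equal_write_output : Prop := ∀ (seq_preds_list : List (List String)) (lines : List (List String)), Dom_write_output seq_preds_list lines → Pre_write_output seq_preds_list lines → Spec_write_output seq_preds_list lines (write_output seq_preds_list lines)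

-- ===== LEMMAS AND PROOFS =====

-- join with empty separator is concatenation
lemma joinE_cons (x : List Char) (t : List (List Char)) :
    PySem.Chars.join [] (x :: t) = x ++ PySem.Chars.join [] t := by
  cases t with
  | nil => simp [PySem.Chars.join_singleton, PySem.Chars.join_nil]
  | cons y r => simp [PySem.Chars.join_cons_cons]

lemma sjoin_cons (s : String) (t : List String) :
    PySem.Str.join "" (s :: t) = s ++ PySem.Str.join "" t := by
  rw [← String.toList_inj]
  simp [PySem.Str.toList_join, joinE_cons]

lemma sjoin_nil : PySem.Str.join "" ([] : List String) = "" := by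
  rw [← String.toList_inj]
  simp [PySem.Str.toList_join, PySem.Chars.join_nil]

lemma sjoin_append (xs ys : List String) :
    PySem.Str.join "" (xs ++ ys) = PySem.Str.join "" xs ++ PySem.Str.join "" ys := by
  induction xs with
  | nil => simp [sjoin_nil]
  | cons x t ih => simp [sjoin_cons, ih, String.append_assoc]

-- the "sentence so far" that A's accumulator holds, expressed from B's state
def pOpen (buf : Option (List String)) : String :=
  match buf with
  | some ws => "{" ++ PySem.Str.join "" ws
  | none => ""

def pSent (segs : List Seg) (buf : Option (List String)) : String :=
  PySem.Str.join "" (segs.map rendSeg) ++ pOpen buf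

lemma key (l : List (String × String)) : ∀ (segs : List Seg) (buf : Option (List String)) (last : String),
    finishA (l.foldl stepA (pSent segs buf, buf.isSome, pySuffix last)) =
    PySem.Str.join "" ((closeB (l.foldl stepB (segs, buf, last))).map rendSeg) := by
  induction l with
  | nil =>
    intro segs buf last
    cases buf with
    | none => simp [finishA, closeB, pSent, pOpen]
    | some ws =>
      simp only [List.foldl_nil, finishA, closeB, Option.isSome, if_true]
      rw [← String.toList_inj]
      simp [pSent, pOpen, rendSeg, sjoin_cons, sjoin_nil, sjoin_append]
  | cons p t ih =>
    intro segs buf last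
    obtain ⟨tag, w⟩ := p
    simp only [List.foldl_cons]
    by_cases h1 : tag == "O"
    · cases buf with
      | some ws =>
        have e : pSent segs (some ws) ++ "|" ++ pySuffix last ++ "}" ++ w
            = pSent (segs ++ [Seg.ent ws (pySuffix last), Seg.txt w]) none := by
          rw [← String.toList_inj]
          simp [pSent, pOpen, rendSeg, sjoin_cons, sjoin_nil, sjoin_append]
        simp only [stepA, stepB, h1, Option.isSome, if_true]
        rw [e]
        exact ih (segs ++ [Seg.ent ws (pySuffix last), Seg.txt w]) none tag
      | none =>
        have e : pSent segs none ++ w = pSent (segs ++ [Seg.txt w]) none := by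
          rw [← String.toList_inj]
          simp [pSent, pOpen, rendSeg, sjoin_cons, sjoin_nil, sjoin_append]
        simp only [stepA, stepB, h1, Option.isSome, if_true, Bool.false_eq_true, if_false]
        rw [e]
        exact ih (segs ++ [Seg.txt w]) none tag
    · by_cases h2 : PySem.Str.startswith tag "B-"
      · cases buf with
        | some ws =>
          have e : pSent segs (some ws) ++ "|" ++ pySuffix last ++ "}" ++ "{" ++ w
              = pSent (segs ++ [Seg.ent ws (pySuffix last)]) (some [w]) := by
            rw [← String.toList_inj]
            simp [pSent, pOpen, rendSeg, sjoin_cons, sjoin_nil, sjoin_append]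
          simp only [stepA, stepB, h1, h2, Option.isSome, if_true, Bool.false_eq_true, if_false]
          rw [e]
          exact ih (segs ++ [Seg.ent ws (pySuffix last)]) (some [w]) tag
        | none =>
          have e : pSent segs none ++ "{" ++ w = pSent segs (some [w]) := by
            rw [← String.toList_inj]
            simp [pSent, pOpen, rendSeg, sjoin_cons, sjoin_nil, sjoin_append]
          simp only [stepA, stepB, h1, h2, Option.isSome, if_true, Bool.false_eq_true, if_false]
          rw [e]
          exact ih segs (some [w]) tag
      · by_cases h3 : PySem.Str.startswith tag "I-"
        · cases buf with
          | some ws =>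
            have e : pSent segs (some ws) ++ w = pSent segs (some (ws ++ [w])) := by
              rw [← String.toList_inj]
              simp [pSent, pOpen, rendSeg, sjoin_cons, sjoin_nil, sjoin_append]
            simp only [stepA, stepB, h1, h2, h3, Option.isSome, if_true, Bool.false_eq_true, if_false]
            rw [e]
            exact ih segs (some (ws ++ [w])) tag
          | none =>
            have e : pSent segs none ++ w = pSent (segs ++ [Seg.txt w]) none := by
              rw [← String.toList_inj]
              simp [pSent, pOpen, rendSeg, sjoin_cons, sjoin_nil, sjoin_append]
            simp only [stepA, stepB, h1, h2, h3, Option.isSome, if_true, Bool.false_eq_true, if_false]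
            rw [e]
            exact ih (segs ++ [Seg.txt w]) none tag
        · simp only [stepA, stepB, h1, h2, h3, Bool.false_eq_true, if_false]
          exact ih segs buf tag

lemma sent_eq (l : List (String × String)) : sentA l = sentB l := by
  have h := key l [] none "O"
  have h1 : pSent [] none = "" := by decide
  have h2 : pySuffix "O" = "O" := by decide
  rw [h1, h2] at h
  simpa [sentA, sentB] using h

theorem write_output_eq (sp lines : List (List String)) (hlen : sp.length ≤ lines.length) :
    write_output sp lines = write_output_alt sp lines := by
  unfold write_output write_output_alt
  rw [PySem.List.foldl_append_singleton_eq_map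
        (fun i => sentA ((PySem.List.pyGetD sp i []).zip (PySem.List.pyGetD lines i [])))]
  simp only [List.nil_append]
  apply List.ext_getElem
  · simp [PySem.List.length_pyRange_one, List.length_zip]
    omega
  · intro i hi1 hi2
    have hilt : i < sp.length := by
      simpa [PySem.List.length_pyRange_one] using hi1
    have hil : i < lines.length := lt_of_lt_of_le hilt hlen
    simp only [List.getElem_map, PySem.List.getElem_pyRange_one, zero_add, List.getElem_zip]
    rw [PySem.List.pyGetD_natCast, PySem.List.pyGetD_natCast]
    rw [List.getD_eq_getElem _ _ hilt, List.getD_eq_getElem _ _ hil]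
    exact sent_eq _

-- ===== VERDICT (by name: the statement is the Claim_ definition above) =====
theorem write_output_spec : Claim_equal_write_output := by
  intro sp lines _ hpre
  unfold Spec_write_output
  exact (write_output_eq sp lines hpre)
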